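-- pv_equiv track=rewrite | github.com/edenuis/Python | Code Challenges/maximumIndex.py | processMax
-- ===== SOURCE A (Python) =====
-- def processMax(numbers):
--     max_set = [0]*len(numbers)
--     curr_max = numbers[len(numbers)-1]
--     for idx in range(len(numbers)-1, -1, -1):
--         if curr_max < numbers[idx]:
--             curr_max = numbers[idx]
--         max_set[idx] = curr_max
--     return max_set
-- ===== SOURCE B (Python) =====
-- def processMax(numbers):
--     if len(numbers) <= 1:
--         return list(numbers)
--     mid = len(numbers) // 2
--     left = processMax(numbers[:mid])
--     right = processMax(numbers[mid:])
--     hi = right[0]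
--     return [v if v > hi else hi for v in left] + right
-- ===== Notes on version B (the rewrite author's own statement) =====
-- stated objective: alternative
-- what changed: Replaces A's backward index loop carrying a running maximum by a divide-and-conquer recursion: split the list in half, compute each half's suffix maxima recursively, and lift the left half by the right half's first (largest) entry.
import Mathlib
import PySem

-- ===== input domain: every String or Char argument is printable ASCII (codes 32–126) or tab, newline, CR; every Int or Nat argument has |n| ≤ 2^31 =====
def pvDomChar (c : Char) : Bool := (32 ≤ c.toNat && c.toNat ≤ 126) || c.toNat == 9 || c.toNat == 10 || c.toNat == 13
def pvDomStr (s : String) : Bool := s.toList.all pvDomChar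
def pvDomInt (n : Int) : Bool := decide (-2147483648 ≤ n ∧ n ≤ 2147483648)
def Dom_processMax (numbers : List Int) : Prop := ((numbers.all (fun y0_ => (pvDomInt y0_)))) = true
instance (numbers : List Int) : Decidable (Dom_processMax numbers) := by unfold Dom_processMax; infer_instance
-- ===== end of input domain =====

-- B replaces A's backward running-max index loop by a divide-and-conquer recursion
-- (suffix maxima of each half, left half lifted by the right half's first entry);
-- on the empty list A raises IndexError while B returns [] (excluded by Pre_).

-- ===== PORT A =====
def processMax (numbers : List Int) : List Int :=
  let maxSet : List Int := List.replicate numbers.length 0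
  let currMax : Int := PySem.List.pyGetD numbers ((numbers.length : Int) - 1) 0
  let st := (PySem.List.pyRange ((numbers.length : Int) - 1) (-1) (-1)).foldl
    (fun (s : Int × List Int) idx =>
      let c : Int := if s.1 < PySem.List.pyGetD numbers idx 0
                     then PySem.List.pyGetD numbers idx 0 else s.1
      (c, s.2.set idx.toNat c)) (currMax, maxSet)
  st.2

-- ===== PORT B =====
def processMax_alt (numbers : List Int) : List Int :=
  if _h : numbers.length ≤ 1 then numbers
  else
    let mid : Nat := numbers.length / 2
    let left := processMax_alt (PySem.List.slice numbers none (some (mid : Int)))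
    let right := processMax_alt (PySem.List.slice numbers (some (mid : Int)) none)
    let hi := PySem.List.pyGetD right 0 0
    left.map (fun v => if hi < v then v else hi) ++ right
termination_by numbers.length
decreasing_by
  · rw [PySem.List.slice_to_natCast]; simp; omega
  · rw [PySem.List.slice_from_natCast]; simp; omega

-- ===== PRECONDITION & SPEC =====
-- Pre_ excludes only the empty list, on which A raises IndexError (it eagerly reads numbers[len(numbers)-1]).
def Pre_processMax (numbers : List Int) : Prop := numbers ≠ []
instance (numbers : List Int) : Decidable (Pre_processMax numbers) := by unfold Pre_processMax; infer_instance
def pvWitness_processMax : List Int := ([3, 1, 4, 1, 5] : List Int)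

def Spec_processMax (numbers : List Int) (out : List Int) : Prop := out = processMax_alt numbers
instance (numbers : List Int) (out : List Int) : Decidable (Spec_processMax numbers out) := by unfold Spec_processMax; infer_instance

-- ===== CLAIM (what is proved, stated in full; the proofs are below) =====
def Claim_equal_processMax : Prop := ∀ (numbers : List Int), Dom_processMax numbers → Pre_processMax numbers → Spec_processMax numbers (processMax numbers)

-- ===== LEMMAS AND PROOFS =====

/-- The shared step: Python's `curr = x if curr < x else curr` is `max`. -/
def pvStep (c x : Int) : Int := if c < x then x else c

theorem pvStep_eq_max (c x : Int) : pvStep c x = max c x := by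
  unfold pvStep; split_ifs <;> omega

/-- Running-max scan with carry `c` (the list of successive values of `curr`). -/
def pvScan (c : Int) : List Int → List Int
  | [] => []
  | x :: t => pvStep c x :: pvScan (pvStep c x) t

theorem pvScan_length (c : Int) (u : List Int) : (pvScan c u).length = u.length := by
  induction u generalizing c with
  | nil => rfl
  | cons x t ih => simp [pvScan, ih]

theorem pvScan_getElem (u : List Int) : ∀ (c : Int) (i : Nat) (h : i < u.length),
    (pvScan c u)[i]'(by rw [pvScan_length]; exact h) = (u.take (i + 1)).foldl max c := by
  induction u with
  | nil => intro _ i h; simp at h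
  | cons x t ih =>
      intro c i h
      cases i with
      | zero => simp [pvScan, pvStep_eq_max]
      | succ i =>
          simp only [pvScan, List.getElem_cons_succ, List.take_succ_cons, List.foldl_cons]
          rw [ih (pvStep c x) i (by simpa using h), pvStep_eq_max]

theorem foldl_max_pull (l : List Int) : ∀ (c a : Int),
    l.foldl max (max c a) = max (l.foldl max c) a := by
  induction l with
  | nil => intro c a; rfl
  | cons x t ih =>
      intro c a
      simp only [List.foldl_cons]
      rw [show max (max c a) x = max (max c x) a by
            rw [max_assoc, max_comm a x, ← max_assoc], ih]

theorem foldl_max_reverse (l : List Int) : ∀ (c : Int),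
    l.reverse.foldl max c = l.foldl max c := by
  induction l with
  | nil => intro c; rfl
  | cons x t ih =>
      intro c
      simp only [List.reverse_cons, List.foldl_append, List.foldl_cons, List.foldl_nil]
      rw [ih, ← foldl_max_pull]

/-- Invariant of A's countdown fold: after processing indices `i-1 … 0`, positions
`0 … i-1` hold the reversed running-max scan of the last `i` elements. -/
theorem a_fold_inv (numbers : List Int) : ∀ (i : Nat), i ≤ numbers.length →
    ∀ (c : Int) (ms : List Int), ms.length = numbers.length →
    (PySem.List.pyRange ((i : Int) - 1) (-1) (-1)).foldl
      (fun (s : Int × List Int) idx =>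
        let c : Int := if s.1 < PySem.List.pyGetD numbers idx 0
                       then PySem.List.pyGetD numbers idx 0 else s.1
        (c, s.2.set idx.toNat c)) (c, ms)
    = ((numbers.reverse.drop (numbers.length - i)).foldl pvStep c,
       (pvScan c (numbers.reverse.drop (numbers.length - i))).reverse ++ ms.drop i) := by
  intro i
  induction i with
  | zero =>
      intro _ c ms _
      rw [PySem.List.pyRange_neg_one_eq_nil (by norm_num)]
      have hd : numbers.reverse.drop numbers.length = [] :=
        List.drop_eq_nil_of_le (by simp)
      simp [hd, pvScan]
  | succ i ih =>
      intro hi c ms hms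
      have hidx : (((i + 1 : Nat) : Int) - 1) = (i : Int) := by push_cast; ring
      rw [hidx, PySem.List.pyRange_neg_one_cons (by omega)]
      simp only [List.foldl_cons]
      have hget : PySem.List.pyGetD numbers (i : Int) 0 = numbers[i]'(by omega) := by
        rw [PySem.List.pyGetD_eq_getElem numbers 0 (by omega) (by exact_mod_cast (by omega : i < numbers.length))]
        simp
      have htoNat : ((i : Int)).toNat = i := by simp
      rw [hget, htoNat]
      rw [ih (by omega) _ _ (by simp [hms])]
      have hdrop : numbers.reverse.drop (numbers.length - (i + 1))
          = numbers[i]'(by omega) :: numbers.reverse.drop (numbers.length - i) := by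
        rw [List.drop_eq_getElem_cons (by simp; omega)]
        congr 1
        · rw [List.getElem_reverse]; congr 1; omega
        · congr 1; omega
      have hdropset : (ms.set i (if c < numbers[i]'(by omega) then numbers[i]'(by omega) else c)).drop i
          = (if c < numbers[i]'(by omega) then numbers[i]'(by omega) else c) :: ms.drop (i + 1) := by
        rw [List.drop_set]
        simp only [lt_irrefl, if_false, Nat.sub_self]
        rw [List.drop_eq_getElem_cons (by omega), List.set_cons_zero]
      rw [hdropset, hdrop]
      simp [pvScan, pvStep, List.append_assoc]

/-- A computes the reversed running-max scan of the reversed input. -/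
theorem a_eq_scan (numbers : List Int) (h : numbers ≠ []) :
    processMax numbers
      = (pvScan (numbers[numbers.length - 1]'(by cases numbers <;> simp_all)) numbers.reverse).reverse := by
  have hlen : 1 ≤ numbers.length := by cases numbers with
    | nil => exact absurd rfl h
    | cons _ _ => simp
  have hc0 : PySem.List.pyGetD numbers ((numbers.length : Int) - 1) 0
      = numbers[numbers.length - 1]'(by omega) := by
    have h1 : ((numbers.length : Int) - 1) = ((numbers.length - 1 : Nat) : Int) := by
      push_cast [Nat.cast_sub hlen]; ring
    rw [h1, PySem.List.pyGetD_eq_getElem numbers 0 (by omega)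
      (by exact_mod_cast (by omega : numbers.length - 1 < numbers.length))]
    simp
  unfold processMax
  simp only []
  rw [hc0]
  rw [a_fold_inv numbers numbers.length le_rfl _ (List.replicate numbers.length 0) (by simp)]
  have hd : (List.replicate numbers.length (0 : Int)).drop numbers.length = [] :=
    List.drop_eq_nil_of_le (by simp)
  simp [hd]

/-- The last element is a member of every nonempty suffix. -/
theorem last_mem_drop (numbers : List Int) (k : Nat) (hk : k < numbers.length) :
    numbers[numbers.length - 1]'(by omega) ∈ numbers.drop k := by
  have h1 : numbers.length - 1 - k < (numbers.drop k).length := by simp; omega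
  have h2 : (numbers.drop k)[numbers.length - 1 - k]'h1 = numbers[numbers.length - 1]'(by omega) := by
    rw [List.getElem_drop]; congr 1; omega
  exact h2 ▸ List.getElem_mem h1

/-- B's divide-and-conquer result: it has the input's length, and entry `k` is the
maximum of the suffix starting at `k` (as the fold Python's comparisons compute). -/
theorem alt_spec (n : Nat) : ∀ (l : List Int), l.length = n →
    (processMax_alt l).length = l.length ∧
    ∀ (k : Nat) (h : Int) (u : List Int), l.drop k = h :: u →
      (processMax_alt l)[k]? = some (u.foldl max h) := by
  induction n using Nat.strong_induction_on with
  | _ n ih =>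
    intro l hl
    rw [processMax_alt]
    split
    case isTrue hle =>
      refine ⟨rfl, ?_⟩
      intro k h u hd
      match l, hle with
      | [], _ => simp at hd
      | [a], _ =>
        match k with
        | 0 =>
          simp only [List.drop_zero] at hd
          cases hd
          simp
        | (k+1) => simp at hd
    case isFalse hgt =>
      simp only [PySem.List.slice_to_natCast, PySem.List.slice_from_natCast]
      have hn2 : 2 ≤ l.length := by omega
      have hm1 : 1 ≤ l.length / 2 := by omega
      have hmlt : l.length / 2 < l.length := by omega
      set mid := l.length / 2 with hmid
      have hlt : (l.take mid).length = mid := by simp; omega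
      have hrt : (l.drop mid).length = l.length - mid := by simp
      obtain ⟨Lh, Lg⟩ := ih (l.take mid).length (by rw [hlt]; omega) _ rfl
      obtain ⟨Rh, Rg⟩ := ih (l.drop mid).length (by rw [hrt]; omega) _ rfl
      obtain ⟨h0, u0, hdm⟩ : ∃ h0 u0, l.drop mid = h0 :: u0 := by
        cases hdm : l.drop mid with
        | nil => exfalso; have := congrArg List.length hdm; simp at this; omega
        | cons a b => exact ⟨a, b, rfl⟩
      have hR0 : (processMax_alt (l.drop mid))[0]? = some (u0.foldl max h0) :=
        Rg 0 h0 u0 (by simpa using hdm)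
      have hR0' : (processMax_alt (l.drop mid))[0]'(by
          rw [Rh, hrt]; omega) = u0.foldl max h0 := by
        rw [List.getElem?_eq_getElem (by rw [Rh, hrt]; omega)] at hR0
        exact Option.some.inj hR0
      have hhi : PySem.List.pyGetD (processMax_alt (l.drop mid)) 0 0 = u0.foldl max h0 := by
        rw [PySem.List.pyGetD_eq_getElem (processMax_alt (l.drop mid)) 0 (le_refl 0)
          (by rw [Rh, hrt]; exact_mod_cast (by omega : (0:Nat) < l.length - mid))]
        simpa using hR0'
      rw [hhi]
      constructor
      · simp [Lh, Rh, hlt, hrt]; omega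
      · intro k h u hd
        have hkn : k < l.length := by
          have := congrArg List.length hd; simp at this; omega
        have hu' : u = l.drop (k + 1) := by
          have := congrArg List.tail hd
          simpa [List.tail_drop] using this.symm
        by_cases hk : k < mid
        · rw [List.getElem?_append_left (by rw [List.length_map, Lh, hlt]; exact hk),
            List.getElem?_map]
          have hdt : (l.take mid).drop k = h :: u.take (mid - k - 1) := by
            rw [List.drop_take, hd]
            rw [List.take_cons (by omega)]
          rw [Lg k h (u.take (mid - k - 1)) hdt]
          simp only [Option.map_some]
          congr 1
          have hsplit : u = u.take (mid - k - 1) ++ (h0 :: u0) := by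
            conv_lhs => rw [← List.take_append_drop (mid - k - 1) u]
            congr 1
            rw [hu', List.drop_drop, show k + 1 + (mid - k - 1) = mid by omega, hdm]
          conv_rhs => rw [hsplit]
          rw [List.foldl_append]
          set s := (u.take (mid - k - 1)).foldl max h with hs
          simp only [List.foldl_cons]
          rw [max_comm s h0, foldl_max_pull]
          set t := u0.foldl max h0 with ht
          split_ifs <;> omega
        · rw [List.getElem?_append_right (by rw [List.length_map, Lh, hlt]; omega)]
          rw [List.length_map, Lh, hlt]
          refine Rg (k - mid) h u ?_
          rw [List.drop_drop, show mid + (k - mid) = k by omega, hd]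

theorem processMax_eq (numbers : List Int) (h : numbers ≠ []) :
    processMax numbers = processMax_alt numbers := by
  have hlen : 1 ≤ numbers.length := by cases numbers with
    | nil => exact absurd rfl h
    | cons _ _ => simp
  set n := numbers.length with hn
  set x : Int := numbers[n - 1]'(by omega) with hx
  rw [a_eq_scan numbers h]
  obtain ⟨Bl, Bg⟩ := alt_spec numbers.length numbers rfl
  apply List.ext_getElem?
  intro k
  by_cases hkn : k < n
  · obtain ⟨hh, u, hd⟩ : ∃ hh u, numbers.drop k = hh :: u := by
      cases hd : numbers.drop k with
      | nil => exfalso; have := congrArg List.length hd; simp at this; omega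
      | cons a b => exact ⟨a, b, rfl⟩
    rw [Bg k hh u hd]
    have hk1 : k < (pvScan x numbers.reverse).reverse.length := by
      simp [pvScan_length]; omega
    rw [List.getElem?_eq_getElem hk1]
    congr 1
    have hL : ((pvScan x numbers.reverse).reverse)[k]'hk1
        = ((numbers.drop k).reverse).foldl max x := by
      rw [List.getElem_reverse]
      have hi : (pvScan x numbers.reverse).length - 1 - k < numbers.reverse.length := by
        simp [pvScan_length]; omega
      rw [pvScan_getElem numbers.reverse x _ hi]
      congr 1
      have : (pvScan x numbers.reverse).length - 1 - k + 1 = n - k := by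
        simp [pvScan_length]; omega
      rw [this, ← List.reverse_drop]
    rw [hL, foldl_max_reverse, hd]
    have hxmem : x ∈ hh :: u := hd ▸ last_mem_drop numbers k hkn
    have hxle : x ≤ u.foldl max hh := by
      rcases List.mem_cons.mp hxmem with h1 | h1
      · exact h1 ▸ (PySem.List.le_foldl_max u x).1
      · exact (PySem.List.le_foldl_max u hh).2 x h1
    simp only [List.foldl_cons]
    rw [max_comm x hh, foldl_max_pull]
    omega
  · rw [List.getElem?_eq_none (by simp [pvScan_length]; omega),
      List.getElem?_eq_none (by rw [Bl]; omega)]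

-- ===== VERDICT (by name: the statement is the Claim_ definition above) =====
theorem processMax_spec : Claim_equal_processMax := by
  intro numbers _ hpre
  unfold Spec_processMax
  exact processMax_eq numbers hpre
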